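-- pv_equiv track=rewrite | github.com/HusanboyUs/hackerrank_solutions | Leetcode/Python/2057.py | smallestEqual
-- ===== SOURCE A (Python) =====
-- def smallestEqual(nums):
--     res = []
--     for x in range(len(nums)):
--         if x%10 == nums[x]:
--             res.append(x)
--
--     if len(res) !=0:
--         return sorted(res)[0]
--     else:
--         return -1
-- ===== SOURCE B (Python) =====
-- def smallestEqual(nums):
--     for i in range(len(nums)):
--         if i % 10 == nums[i]:
--             return i
--     return -1
-- ===== Notes on version B (the rewrite author's own statement) =====
-- stated objective: simpler
-- what changed: B returns the index immediately at the first match instead of collecting all matching indices into a list and sorting it to take the minimum.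
import Mathlib
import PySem

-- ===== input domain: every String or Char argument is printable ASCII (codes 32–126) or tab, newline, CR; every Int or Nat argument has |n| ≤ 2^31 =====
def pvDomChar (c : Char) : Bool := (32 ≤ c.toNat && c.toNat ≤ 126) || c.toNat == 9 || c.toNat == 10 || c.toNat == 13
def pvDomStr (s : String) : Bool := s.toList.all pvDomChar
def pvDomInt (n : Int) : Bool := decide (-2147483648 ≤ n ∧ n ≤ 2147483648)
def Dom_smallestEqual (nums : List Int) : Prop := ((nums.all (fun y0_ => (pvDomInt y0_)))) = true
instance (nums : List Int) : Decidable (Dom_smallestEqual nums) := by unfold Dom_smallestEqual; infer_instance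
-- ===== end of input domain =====

-- B replaces A's collect-all-matches-then-sort with a single early-return scan (simpler, no list, no sort).


-- ===== PORT A =====
-- 'for x in range(len(nums)): if x%10 == nums[x]: res.append(x)' — positional loop,
-- ported as recursion over the list carrying the index x; x ≥ 0 so Python's % agrees with %.
def pvCollectA : List Int → Int → List Int
  | [], _ => []
  | v :: t, x => if x % 10 == v then x :: pvCollectA t (x + 1) else pvCollectA t (x + 1)

def smallestEqual (nums : List Int) : Int :=
  let res := pvCollectA nums 0
  if res.length ≠ 0 then (PySem.List.sorted res (fun y => y) false).headI
  else -1

-- ===== PORT B =====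
-- 'for i in range(len(nums)): if i%10 == nums[i]: return i / return -1'
def pvFindB : List Int → Int → Int
  | [], _ => -1
  | v :: t, i => if i % 10 == v then i else pvFindB t (i + 1)

def smallestEqual_alt (nums : List Int) : Int := pvFindB nums 0

-- ===== PRECONDITION & SPEC =====
def Spec_smallestEqual (nums : List Int) (out : Int) : Prop := out = smallestEqual_alt nums
instance (nums : List Int) (out : Int) : Decidable (Spec_smallestEqual nums out) := by unfold Spec_smallestEqual; infer_instance

-- ===== CLAIM (what is proved, stated in full; the proofs are below) =====
def Claim_equal_smallestEqual : Prop := ∀ (nums : List Int), Dom_smallestEqual nums → Spec_smallestEqual nums (smallestEqual nums)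

-- ===== LEMMAS AND PROOFS =====
theorem pvCollectA_mem_le : ∀ (nums : List Int) (i : Int), ∀ x ∈ pvCollectA nums i, i ≤ x := by
  intro nums
  induction nums with
  | nil => intro i x hx; simp [pvCollectA] at hx
  | cons v t ih =>
    intro i x hx
    simp only [pvCollectA] at hx
    split at hx
    · rcases List.mem_cons.1 hx with h | h
      · omega
      · have := ih (i + 1) x h; omega
    · have := ih (i + 1) x hx; omega

theorem pvCollectA_pairwise : ∀ (nums : List Int) (i : Int), (pvCollectA nums i).Pairwise (· < ·) := by
  intro nums
  induction nums with
  | nil => intro i; simp [pvCollectA]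
  | cons v t ih =>
    intro i
    simp only [pvCollectA]
    split
    · exact List.pairwise_cons.2 ⟨fun x hx => by have := pvCollectA_mem_le t (i + 1) x hx; omega, ih (i + 1)⟩
    · exact ih (i + 1)

theorem pvFindB_eq_headD : ∀ (nums : List Int) (i : Int), pvFindB nums i = (pvCollectA nums i).headD (-1) := by
  intro nums
  induction nums with
  | nil => intro i; rfl
  | cons v t ih =>
    intro i
    simp only [pvFindB, pvCollectA]
    split
    · rfl
    · exact ih (i + 1)

-- ===== VERDICT (by name: the statement is the Claim_ definition above) =====
theorem smallestEqual_spec : Claim_equal_smallestEqual := by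
  intro nums _
  unfold Spec_smallestEqual smallestEqual smallestEqual_alt
  rw [pvFindB_eq_headD]
  have hs : PySem.List.sorted (pvCollectA nums 0) (fun y => y) false = pvCollectA nums 0 :=
    PySem.List.sorted_eq_of_perm_of_pairwise_lt _ _ (fun y => y) (List.Perm.refl _) (pvCollectA_pairwise nums 0)
  cases h : pvCollectA nums 0 with
  | nil => simp [h]
  | cons a l => simp [h, hs, h ▸ hs]
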